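-- pv_equiv track=rewrite | github.com/eu-snehagupta/LearningPython | kattis/SigmaKattisC/main.py | find_xor_of_possible_subset
-- ===== SOURCE A (Python) =====
-- from itertools import chain, combinations
--
-- def find_possible_set(iterable):
--     new_iterable = []
--     for i in iterable:
--         if not(i in new_iterable):
--             new_iterable.append(i)
--     return chain.from_iterable(combinations(new_iterable, r) for r in range(len(new_iterable)+1))
--
-- def find_xor_sum(combination):
--     x_sum = combination[0]
--     for i in range(1, len(combination)):
--         x_sum = x_sum ^ combination[i]
--     return x_sum
--
-- def find_xor_of_possible_subset(number_list):
--     xor_sum_list = []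
--     subsets = []
--     for i, item in enumerate(find_possible_set(number_list)):
--         if len(item) > 1:
--             subsets.append(item)
--     for each_combination in subsets:
--         xor_sum_list.append(find_xor_sum(list(each_combination)))
--     return xor_sum_list
-- ===== SOURCE B (Python) =====
-- def find_xor_of_possible_subset(number_list):
--     elems = []
--     for x in number_list:
--         if x not in elems:
--             elems.append(x)
--     out = []
--
--     def pick(start, need, acc):
--         if need == 0:
--             out.append(acc)
--             return
--         for i in range(start, len(elems)):
--             v = elems[i]
--             pick(i + 1, need - 1, v if acc is None else acc ^ v)
--
--     for r in range(2, len(elems) + 1):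
--         pick(0, r, None)
--     return out
-- ===== Notes on version B (the rewrite author's own statement) =====
-- stated objective: alternative
-- what changed: Replaces itertools.combinations materializing each subset plus a separate per-subset XOR fold by a recursive backtracking generator that threads a running XOR accumulator, so no subset tuple is ever built.
import Mathlib
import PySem

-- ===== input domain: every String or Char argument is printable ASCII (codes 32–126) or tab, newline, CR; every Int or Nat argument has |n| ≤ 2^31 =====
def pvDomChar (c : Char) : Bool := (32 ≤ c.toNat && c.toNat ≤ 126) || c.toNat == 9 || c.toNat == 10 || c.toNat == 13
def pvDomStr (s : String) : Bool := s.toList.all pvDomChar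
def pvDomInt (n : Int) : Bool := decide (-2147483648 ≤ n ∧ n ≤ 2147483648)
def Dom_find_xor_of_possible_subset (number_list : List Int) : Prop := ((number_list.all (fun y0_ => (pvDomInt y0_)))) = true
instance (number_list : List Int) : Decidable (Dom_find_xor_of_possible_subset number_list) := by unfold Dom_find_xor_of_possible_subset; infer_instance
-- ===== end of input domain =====

-- B replaces itertools.combinations + a separate per-subset XOR fold by a
-- backtracking generator threading a running XOR accumulator (alternative decomposition, same output).

-- ===== PORT A =====
-- itertools.combinations(l, k) in lexicographic-by-index order
def pvCombinations : List Int → Nat → List (List Int)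
  | _, 0 => [[]]
  | [], _ + 1 => []
  | x :: xs, k + 1 => (pvCombinations xs k).map (fun c => x :: c) ++ pvCombinations xs (k + 1)

def find_possible_set (iterable : List Int) : List (List Int) :=
  let new_iterable := iterable.foldl (fun acc i => if i ∈ acc then acc else acc ++ [i]) []
  ((List.range (new_iterable.length + 1)).map (fun r => pvCombinations new_iterable r)).flatten

def find_xor_sum (combination : List Int) : Int :=
  (PySem.List.pyRange 1 (combination.length : Int) 1).foldl
    (fun s i => PySem.Int.bxor s (PySem.List.pyGetD combination i 0)) (PySem.List.pyGetD combination 0 0)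

def find_xor_of_possible_subset (number_list : List Int) : List Int :=
  let subsets := (find_possible_set number_list).foldl
    (fun acc item => if item.length > 1 then acc ++ [item] else acc) []
  subsets.foldl (fun acc c => acc ++ [find_xor_sum c]) []

-- ===== PORT B =====
-- pick(start, need, acc) of Source B: the loop over i in range(start, len(elems)) becomes
-- structural recursion on the suffix of elems that starts at `start`.
def pvPick : List Int → Nat → Option Int → List Int
  | _, 0, acc => acc.toList
  | [], _ + 1, _ => []
  | x :: xs, k + 1, acc =>
      pvPick xs k (some (match acc with | none => x | some a => PySem.Int.bxor a x)) ++
        pvPick xs (k + 1) acc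

def find_xor_of_possible_subset_alt (number_list : List Int) : List Int :=
  let elems := number_list.foldl (fun acc x => if x ∈ acc then acc else acc ++ [x]) []
  (PySem.List.pyRange 2 ((elems.length : Int) + 1) 1).foldl
    (fun out r => out ++ pvPick elems r.toNat none) []

-- ===== PRECONDITION & SPEC =====
def Spec_find_xor_of_possible_subset (number_list : List Int) (out : List Int) : Prop := out = find_xor_of_possible_subset_alt number_list
instance (number_list : List Int) (out : List Int) : Decidable (Spec_find_xor_of_possible_subset number_list out) := by unfold Spec_find_xor_of_possible_subset; infer_instance

-- ===== CLAIM (what is proved, stated in full; the proofs are below) =====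
def Claim_equal_find_xor_of_possible_subset : Prop := ∀ (number_list : List Int), Dom_find_xor_of_possible_subset number_list → Spec_find_xor_of_possible_subset number_list (find_xor_of_possible_subset number_list)

-- ===== LEMMAS AND PROOFS =====

-- xor-sum of a nonempty list, the common shape both ports boil down to
def pvXorSum : List Int → Int
  | [] => 0
  | h :: t => t.foldl (fun s x => PySem.Int.bxor s x) h

lemma find_xor_sum_eq (c : List Int) : find_xor_sum c = pvXorSum c := by
  cases c with
  | nil =>
      simp [find_xor_sum, pvXorSum, PySem.List.pyRange_one_eq_nil, PySem.List.pyGetD,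
        PySem.List.pyGet?]
  | cons h t =>
      have h0 : PySem.List.pyGetD (h :: t) 0 0 = h := by
        simp [PySem.List.pyGetD, PySem.List.pyGet?, PySem.List.pyIdx?]
      have h1 := PySem.List.foldl_pyRange_pyGetD' (h :: t) 0
        (fun s x => PySem.Int.bxor s x) h (a := 1) (by norm_num)
      simp only [find_xor_sum, h0]
      rw [h1]
      simp [pvXorSum]

lemma pick_some : ∀ (l : List Int) (k : Nat) (a : Int),
    pvPick l k (some a) =
      (pvCombinations l k).map (fun c => c.foldl (fun s x => PySem.Int.bxor s x) a) := by
  intro l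
  induction l with
  | nil => intro k a; cases k <;> simp [pvPick, pvCombinations]
  | cons x xs ih =>
      intro k a
      cases k with
      | zero => simp [pvPick, pvCombinations]
      | succ k => simp [pvPick, pvCombinations, ih, List.map_map, Function.comp_def]

lemma pick_none : ∀ (l : List Int) (k : Nat),
    pvPick l (k + 1) none = (pvCombinations l (k + 1)).map pvXorSum := by
  intro l
  induction l with
  | nil => intro k; simp [pvPick, pvCombinations]
  | cons x xs ih =>
      intro k
      show pvPick xs k (some x) ++ pvPick xs (k + 1) none = _
      rw [pick_some, ih]
      simp [pvCombinations, List.map_map, Function.comp_def, pvXorSum]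

lemma comb_length : ∀ (l : List Int) (k : Nat) (c : List Int),
    c ∈ pvCombinations l k → c.length = k := by
  intro l
  induction l with
  | nil => intro k c hc; cases k <;> simp_all [pvCombinations]
  | cons x xs ih =>
      intro k c hc
      cases k with
      | zero => simp_all [pvCombinations]
      | succ k =>
          simp [pvCombinations] at hc
          rcases hc with ⟨c', hc', rfl⟩ | hc
          · simp [ih k c' hc']
          · exact ih _ _ hc

-- filtering the size-k combinations by "length > 1"
lemma filter_comb (l : List Int) (k : Nat) :
    (pvCombinations l k).filter (fun c => decide (c.length > 1)) =
      if 1 < k then pvCombinations l k else [] := by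
  split_ifs with h
  · exact List.filter_eq_self.mpr (fun c hc => by simp [comb_length l k c hc, h])
  · exact List.filter_eq_nil_iff.mpr (fun c hc => by
      have hl := comb_length l k c hc
      simp only [decide_eq_true_eq, gt_iff_lt, hl]
      omega)

lemma flatten_filter_map (g : List Int → Int) (e : List Int) :
    ∀ (rs : List Nat),
    ((((rs.map (pvCombinations e)).flatten.filter (fun c => decide (c.length > 1))).map g)) =
      rs.flatMap (fun r => if 1 < r then (pvCombinations e r).map g else []) := by
  intro rs
  induction rs with
  | nil => simp
  | cons r rs ih =>
      simp only [List.map_cons, List.flatten_cons, List.filter_append, List.map_append,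
        List.flatMap_cons, ih, filter_comb]
      split_ifs <;> simp

lemma rangeF (g : Nat → List Int) : ∀ (m : Nat),
    (List.range (m + 2)).flatMap (fun r => if 1 < r then g r else []) =
      (List.range m).flatMap (fun k => g (k + 2)) := by
  intro m
  induction m with
  | zero => simp [List.range_succ]
  | succ m ih =>
      rw [show m + 1 + 2 = (m + 2) + 1 from rfl, List.range_succ (n := m + 2),
        List.range_succ (n := m)]
      simp only [List.flatMap_append, ih, List.flatMap_cons, List.flatMap_nil]
      have h2 : 1 < m + 2 := by omega
      simp [h2]

-- the common core: for ANY element list e the two pipelines agree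
lemma core (e : List Int) :
    ((((List.range (e.length + 1)).map (fun r => pvCombinations e r)).flatten.filter
        (fun c => decide (c.length > 1))).map find_xor_sum) =
      (PySem.List.pyRange 2 ((e.length : Int) + 1) 1).flatMap (fun r => pvPick e r.toNat none) := by
  have hfx : (find_xor_sum : List Int → Int) = pvXorSum := funext find_xor_sum_eq
  rw [hfx, flatten_filter_map pvXorSum e (List.range (e.length + 1))]
  rcases hn : e.length with _ | n
  · simp [PySem.List.pyRange_one_eq_nil, List.range_succ]
  · rcases n with _ | m
    · simp [List.range_succ]
    · rw [show m + 1 + 1 + 1 = (m + 1) + 2 from rfl, rangeF]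
      have hb : (((m + 1 + 1 : Nat) : Int) + 1 - 2).toNat = m + 1 := by omega
      have hr : PySem.List.pyRange 2 (((m + 1 + 1 : Nat) : Int) + 1) 1 =
          (List.range (m + 1)).map (fun (k : Nat) => (2 : Int) + (k : Int)) := by
        rw [PySem.List.pyRange_one, hb]
      rw [hr, List.flatMap_map]
      apply List.flatMap_congr
      intro k _
      have ht : ((2 : Int) + (k : Int)).toNat = k + 2 := by omega
      rw [ht, pick_none]

-- ===== VERDICT (by name: the statement is the Claim_ definition above) =====
theorem find_xor_of_possible_subset_spec : Claim_equal_find_xor_of_possible_subset := by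
  intro number_list _
  unfold Spec_find_xor_of_possible_subset find_xor_of_possible_subset find_xor_of_possible_subset_alt find_possible_set
  simp only [PySem.List.foldl_append_ite, PySem.List.foldl_append_singleton_eq_map,
    PySem.List.foldl_append_eq_flatMap, List.nil_append, List.map_id']
  exact core _
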